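-- pv_equiv track=rewrite | github.com/therickybobbeh/dep-scanner | backend/app/resolver/js_resolver.py | _parse_yarn_entries
-- ===== SOURCE A (Python) =====
-- from typing import List, Dict, Optional, Set
--
-- def _parse_yarn_entries(content: str) -> List[Dict[str, str]]:
--     """Parse yarn.lock content into individual package entries"""
--     entries = []
--     current_entry = {}
--     in_entry = False
--
--     for line in content.splitlines():
--         line = line.rstrip()
--
--         if line and not line.startswith(" ") and not line.startswith("\t"):
--             # New entry
--             if current_entry:
--                 entries.append(current_entry)
--             current_entry = {"header": line}
--             in_entry = True
--         elif in_entry and line.strip():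
--             # Entry property
--             if ":" in line:
--                 key, value = line.split(":", 1)
--                 current_entry[key.strip()] = value.strip().strip('"')
--
--     if current_entry:
--         entries.append(current_entry)
--
--     return entries
-- ===== SOURCE B (Python) =====
-- def _is_header(line):
--     return bool(line) and not line.startswith(" ") and not line.startswith("\t")
--
--
-- def _parse_block(block):
--     entry = {"header": block[0]}
--     for line in block[1:]:
--         if line.strip() and ":" in line:
--             key, value = line.split(":", 1)
--             entry[key.strip()] = value.strip().strip('"')
--     return entry
--
--
-- def _parse_yarn_entries(content):
--     """Two-phase: partition the rstripped lines into header-led blocks, then map a per-block parser."""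
--     lines = [l.rstrip() for l in content.splitlines()]
--     n = len(lines)
--     blocks = []
--     i = 0
--     while i < n and not _is_header(lines[i]):
--         i += 1
--     while i < n:
--         j = i + 1
--         while j < n and not _is_header(lines[j]):
--             j += 1
--         blocks.append(lines[i:j])
--         i = j
--     return [_parse_block(b) for b in blocks]
-- ===== Notes on version B (the rewrite author's own statement) =====
-- stated objective: alternative
-- what changed: Replaces A's single stateful loop with in_entry/current_entry flags by a two-phase pipeline: partition the rstripped lines into header-led blocks, then map an independent per-block parser over the blocks.
import Mathlib
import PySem

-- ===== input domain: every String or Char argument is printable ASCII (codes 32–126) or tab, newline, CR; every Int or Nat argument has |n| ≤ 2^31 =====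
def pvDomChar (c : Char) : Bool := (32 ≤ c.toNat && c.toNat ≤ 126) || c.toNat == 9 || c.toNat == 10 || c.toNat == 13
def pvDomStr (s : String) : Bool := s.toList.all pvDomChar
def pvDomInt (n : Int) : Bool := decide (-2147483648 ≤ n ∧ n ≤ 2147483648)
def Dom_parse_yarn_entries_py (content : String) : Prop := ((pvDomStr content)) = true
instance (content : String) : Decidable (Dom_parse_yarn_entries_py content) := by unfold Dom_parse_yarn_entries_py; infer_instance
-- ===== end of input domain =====

-- B replaces A's single stateful loop (in_entry/current_entry flags) with an explicit
-- grouping phase into header-led blocks followed by a per-block parsing map (objective: alternative).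

-- ===== PORT A =====
-- stateful loop of A: entries, current_entry (a dict), in_entry flag
def pyA_go (lines : List String) (entries : List (List (String × String)))
    (cur : PySem.Dict String String) (inEntry : Bool) : List (List (String × String)) :=
  match lines with
  | [] => if cur.items ≠ [] then entries ++ [cur.items] else entries
  | l :: rest =>
    let line := PySem.Str.rstrip l
    if line != "" && !(PySem.Str.startswith line " ") && !(PySem.Str.startswith line "\t") then
      pyA_go rest (if cur.items ≠ [] then entries ++ [cur.items] else entries)
        (PySem.Dict.insert PySem.Dict.empty "header" line) true
    else if inEntry && (PySem.Str.strip line != "") then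
      if PySem.Str.isIn ":" line then
        -- key, value = line.split(":", 1): ":" ∈ line guarantees exactly two parts
        let parts := (PySem.Str.splitMax? line ":" 1).getD []
        pyA_go rest entries
          (PySem.Dict.insert cur (PySem.Str.strip (parts.headD ""))
            (PySem.Str.stripChars (PySem.Str.strip (parts.getD 1 "")) "\"")) inEntry
      else pyA_go rest entries cur inEntry
    else pyA_go rest entries cur inEntry

def parse_yarn_entries_py (content : String) : List (List (String × String)) :=
  pyA_go (PySem.Str.splitlines content) [] PySem.Dict.empty false

-- ===== PORT B =====
def pyB_isHeader (line : String) : Bool :=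
  line != "" && !(PySem.Str.startswith line " ") && !(PySem.Str.startswith line "\t")

-- inner while loop of B: collect already-rstripped lines up to the next header
def pyB_takeBlock : List String → List String × List String
  | [] => ([], [])
  | s :: rest =>
    if pyB_isHeader s then ([], s :: rest)
    else
      let p := pyB_takeBlock rest
      (s :: p.1, p.2)

theorem pyB_takeBlock_len (l : List String) : (pyB_takeBlock l).2.length ≤ l.length := by
  induction l with
  | nil => simp [pyB_takeBlock]
  | cons s rest ih =>
    simp only [pyB_takeBlock]
    split
    · simp
    · simpa using Nat.le_succ_of_le ih

-- B's grouping loops: skip pre-header lines, then cut a block at each header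
def pyB_blocks : List String → List (List String)
  | [] => []
  | s :: rest =>
    if pyB_isHeader s then
      let p := pyB_takeBlock rest
      (s :: p.1) :: pyB_blocks p.2
    else pyB_blocks rest
termination_by l => l.length
decreasing_by
  · exact Nat.lt_succ_of_le (pyB_takeBlock_len rest)
  · simp

-- one property line folded into the block's dict
def pyB_prop (d : PySem.Dict String String) (line : String) : PySem.Dict String String :=
  if (PySem.Str.strip line != "") && PySem.Str.isIn ":" line then
    let parts := (PySem.Str.splitMax? line ":" 1).getD []
    PySem.Dict.insert d (PySem.Str.strip (parts.headD ""))
      (PySem.Str.stripChars (PySem.Str.strip (parts.getD 1 "")) "\"")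
  else d

def pyB_parseBlock (block : List String) : List (String × String) :=
  match block with
  | [] => []   -- unreachable: blocks are header-led, hence nonempty
  | h :: props =>
    (props.foldl pyB_prop (PySem.Dict.insert PySem.Dict.empty "header" h)).items

def parse_yarn_entries_py_alt (content : String) : List (List (String × String)) :=
  (pyB_blocks ((PySem.Str.splitlines content).map PySem.Str.rstrip)).map pyB_parseBlock

-- ===== PRECONDITION & SPEC =====
def Spec_parse_yarn_entries_py (content : String) (out : List (List (String × String))) : Prop := out = parse_yarn_entries_py_alt content
instance (content : String) (out : List (List (String × String))) : Decidable (Spec_parse_yarn_entries_py content out) := by unfold Spec_parse_yarn_entries_py; infer_instance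

-- ===== CLAIM (what is proved, stated in full; the proofs are below) =====
def Claim_equal_parse_yarn_entries_py : Prop := ∀ (content : String), Dom_parse_yarn_entries_py content → Spec_parse_yarn_entries_py content (parse_yarn_entries_py content)

-- ===== LEMMAS AND PROOFS =====

theorem insert_items_ne_nil (d : PySem.Dict String String) (k v : String) :
    (PySem.Dict.insert d k v).items ≠ [] := by
  rw [PySem.Dict.items_insert]
  split
  · next hc =>
    intro hnil
    rw [List.map_eq_nil_iff] at hnil
    rw [PySem.Dict.contains_eq_decide_mem_keys] at hc
    simp only [PySem.Dict.keys, hnil] at hc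
    simp at hc
  · simp

-- A's loop with a live entry equals: finish the current block, then map the block parser
theorem pyA_go_inEntry (ls : List String) (entries : List (List (String × String)))
    (cur : PySem.Dict String String) (h : cur.items ≠ []) :
    pyA_go ls entries cur true =
      entries ++ (((pyB_takeBlock (ls.map PySem.Str.rstrip)).1.foldl pyB_prop cur).items)
        :: (pyB_blocks (pyB_takeBlock (ls.map PySem.Str.rstrip)).2).map pyB_parseBlock := by
  induction ls generalizing entries cur with
  | nil => simp [pyA_go, pyB_takeBlock, pyB_blocks, h]
  | cons l rest ih =>
    simp only [pyA_go, List.map_cons]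
    rw [show (PySem.Str.rstrip l != "" && !(PySem.Str.startswith (PySem.Str.rstrip l) " ")
        && !(PySem.Str.startswith (PySem.Str.rstrip l) "\t")) = pyB_isHeader (PySem.Str.rstrip l) from rfl]
    by_cases hH : pyB_isHeader (PySem.Str.rstrip l) = true
    · rw [if_pos hH]
      simp only [pyB_takeBlock, hH, if_pos]
      rw [if_pos h, ih (entries ++ [cur.items]) _ (insert_items_ne_nil _ _ _)]
      simp only [pyB_blocks, hH, if_true, List.map_cons, pyB_parseBlock]
      simp [List.foldl_nil, List.append_assoc]
    · rw [if_neg hH]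
      simp only [pyB_takeBlock, hH, Bool.false_eq_true, if_false, Bool.true_and]
      by_cases hs : (PySem.Str.strip (PySem.Str.rstrip l) != "") = true
      · rw [if_pos hs]
        by_cases hc : PySem.Str.isIn ":" (PySem.Str.rstrip l) = true
        · rw [if_pos hc]
          rw [ih _ _ (insert_items_ne_nil _ _ _)]
          simp only [List.foldl_cons]
          rw [show pyB_prop cur (PySem.Str.rstrip l) = _ from by
            unfold pyB_prop; rw [if_pos (by rw [hs, hc]; rfl)]]
        · rw [if_neg hc]
          rw [ih _ _ h]
          simp only [List.foldl_cons]
          rw [show pyB_prop cur (PySem.Str.rstrip l) = cur from by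
            unfold pyB_prop
            rw [if_neg (by simp only [Bool.not_eq_true] at hc
                           simp only [hc, Bool.and_false]
                           exact Bool.false_ne_true)]]
      · rw [if_neg hs]
        rw [ih _ _ h]
        simp only [List.foldl_cons]
        rw [show pyB_prop cur (PySem.Str.rstrip l) = cur from by
          unfold pyB_prop
          rw [if_neg (by simp only [Bool.not_eq_true] at hs
                         simp only [hs, Bool.false_and]
                         exact Bool.false_ne_true)]]

-- A's loop before any header equals B's grouping+mapping
theorem pyA_go_start (ls : List String) (entries : List (List (String × String))) :
    pyA_go ls entries PySem.Dict.empty false =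
      entries ++ (pyB_blocks (ls.map PySem.Str.rstrip)).map pyB_parseBlock := by
  induction ls generalizing entries with
  | nil => simp [pyA_go, pyB_blocks, PySem.Dict.empty]
  | cons l rest ih =>
    simp only [pyA_go, List.map_cons]
    rw [show (PySem.Str.rstrip l != "" && !(PySem.Str.startswith (PySem.Str.rstrip l) " ")
        && !(PySem.Str.startswith (PySem.Str.rstrip l) "\t")) = pyB_isHeader (PySem.Str.rstrip l) from rfl]
    by_cases hH : pyB_isHeader (PySem.Str.rstrip l) = true
    · rw [if_pos hH]
      simp only [pyB_blocks, hH, if_true]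
      rw [pyA_go_inEntry rest _ _ (insert_items_ne_nil _ _ _)]
      have hemp : (PySem.Dict.empty : PySem.Dict String String).items = [] := rfl
      rw [if_neg (by simp [hemp])]
      simp [pyB_parseBlock]
    · rw [if_neg hH]
      have hemp : (PySem.Dict.empty : PySem.Dict String String).items = [] := rfl
      simp only [Bool.false_and, Bool.false_eq_true, if_false]
      rw [ih entries]
      simp [pyB_blocks, hH]

-- ===== VERDICT (by name: the statement is the Claim_ definition above) =====
theorem parse_yarn_entries_py_spec : Claim_equal_parse_yarn_entries_py := by
  intro content _
  show _ = _
  unfold parse_yarn_entries_py parse_yarn_entries_py_alt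
  simpa using pyA_go_start (PySem.Str.splitlines content) []
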